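-- pv_equiv track=rewrite | github.com/libyal/dtformats | dtformats/wmi_repository.py | _FormatFilenameAsGlob
-- ===== SOURCE A (Python) =====
-- def _FormatFilenameAsGlob(filename):
--   """Formats the filename as a case-insensitive glob.
--
--   Args:
--     filename (str): name of the file.
--
--   Returns:
--     str: case-insensitive glob of representation the filename.
--   """
--   glob_parts = []
--   for character in filename:
--     if character.isalpha():
--       character_upper = character.upper()
--       character_lower = character.lower()
--       glob_part = f'[{character_upper:s}{character_lower:s}]'
--     else:
--       glob_part = character
--     glob_parts.append(glob_part)
--
--   return ''.join(glob_parts)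
-- ===== SOURCE B (Python) =====
-- def _FormatFilenameAsGlob(filename):
--   """Formats the filename as a case-insensitive glob."""
--   table = {
--       ord(c): f'[{c.upper()}{c.lower()}]'
--       for c in set(filename) if c.isalpha()}
--   return filename.translate(table)
-- ===== Notes on version B (the rewrite author's own statement) =====
-- stated objective: idiomatic
-- what changed: B builds a translation table keyed by codepoint from the distinct alphabetic characters once and lets str.translate do the per-codepoint pass, instead of an explicit per-character append loop joined at the end.
import Mathlib
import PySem

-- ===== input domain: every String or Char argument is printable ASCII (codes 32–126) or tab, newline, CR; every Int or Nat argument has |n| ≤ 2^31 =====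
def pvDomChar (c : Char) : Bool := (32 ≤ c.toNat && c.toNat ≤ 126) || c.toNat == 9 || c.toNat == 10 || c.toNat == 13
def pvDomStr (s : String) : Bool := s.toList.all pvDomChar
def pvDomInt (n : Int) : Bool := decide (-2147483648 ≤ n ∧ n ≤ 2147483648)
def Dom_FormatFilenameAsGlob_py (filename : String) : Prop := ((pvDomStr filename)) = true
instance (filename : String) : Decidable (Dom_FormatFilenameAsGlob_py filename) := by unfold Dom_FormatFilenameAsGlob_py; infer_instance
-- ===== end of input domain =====

-- B builds a codepoint→replacement table from the distinct alphabetic characters once and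
-- lets str.translate do the per-codepoint pass (idiomatic), instead of A's per-character append loop.

-- ===== PORT A =====
-- A: explicit loop appending one glob part per character, then ''.join.
def FormatFilenameAsGlob_py (filename : String) : String :=
  let glob_parts : List (List Char) :=
    filename.toList.foldl (fun glob_parts character =>
      if PySem.Chars.isalpha character then
        let character_upper := PySem.Chars.upperChar character
        let character_lower := PySem.Chars.lowerChar character
        let glob_part := ['[', character_upper, character_lower, ']']
        glob_parts ++ [glob_part]
      else
        glob_parts ++ [[character]]) []
  String.ofList (PySem.Chars.join [] glob_parts)

-- ===== PORT B =====
-- B: {ord(c): f'[{c.upper()}{c.lower()}]' for c in set(filename) if c.isalpha()} then filename.translate(table).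
def FormatFilenameAsGlob_py_alt (filename : String) : String :=
  let table : PySem.Dict Nat (List Char) :=
    (PySem.Set.ofList filename.toList).foldl (fun table c =>
      if PySem.Chars.isalpha c then
        table.insert c.toNat ['[', PySem.Chars.upperChar c, PySem.Chars.lowerChar c, ']']
      else table) PySem.Dict.empty
  -- str.translate ported by hand (no PySem primitive): each codepoint is replaced by its table
  -- entry, unmapped codepoints are kept — exact here since every table value is a string.
  String.ofList (filename.toList.flatMap (fun c => (table.get? c.toNat).getD [c]))

-- ===== PRECONDITION & SPEC =====
def Spec_FormatFilenameAsGlob_py (filename : String) (out : String) : Prop := out = FormatFilenameAsGlob_py_alt filename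
instance (filename : String) (out : String) : Decidable (Spec_FormatFilenameAsGlob_py filename out) := by unfold Spec_FormatFilenameAsGlob_py; infer_instance

-- ===== CLAIM (what is proved, stated in full; the proofs are below) =====
def Claim_equal_FormatFilenameAsGlob_py : Prop := ∀ (filename : String), Dom_FormatFilenameAsGlob_py filename → Spec_FormatFilenameAsGlob_py filename (FormatFilenameAsGlob_py filename)

-- ===== LEMMAS AND PROOFS =====

-- the per-character glob fragment both programs produce
def pvFrag (c : Char) : List Char :=
  if PySem.Chars.isalpha c then ['[', PySem.Chars.upperChar c, PySem.Chars.lowerChar c, ']']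
  else [c]

-- B's table-building step
def pvStepB (table : PySem.Dict Nat (List Char)) (c : Char) : PySem.Dict Nat (List Char) :=
  if PySem.Chars.isalpha c then
    table.insert c.toNat ['[', PySem.Chars.upperChar c, PySem.Chars.lowerChar c, ']']
  else table

lemma pvCharToNat_inj {a c : Char} (h : a.toNat = c.toNat) : a = c :=
  Char.ext (UInt32.toNat_inj.mp h)

lemma pvA_fold (cs : List Char) (acc : List (List Char)) :
    cs.foldl (fun glob_parts character =>
      if PySem.Chars.isalpha character then
        glob_parts ++ [['[', PySem.Chars.upperChar character, PySem.Chars.lowerChar character, ']']]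
      else glob_parts ++ [[character]]) acc = acc ++ cs.map pvFrag := by
  induction cs generalizing acc with
  | nil => simp
  | cons a cs ih =>
      simp only [List.foldl_cons, List.map_cons, pvFrag]
      by_cases h : PySem.Chars.isalpha a = true <;> simp [h, ih]

lemma pvTable_get (cs : List Char) (d : PySem.Dict Nat (List Char)) (c : Char) :
    (cs.foldl pvStepB d).get? c.toNat =
      if c ∈ cs ∧ PySem.Chars.isalpha c = true
      then some ['[', PySem.Chars.upperChar c, PySem.Chars.lowerChar c, ']']
      else d.get? c.toNat := by
  induction cs generalizing d with
  | nil => simp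
  | cons a cs ih =>
      simp only [List.foldl_cons, ih]
      by_cases hac : a = c
      · subst hac
        by_cases hal : PySem.Chars.isalpha a = true
        · by_cases hm : a ∈ cs <;>
            simp [hal, hm, pvStepB, PySem.Dict.get?_insert_self]
        · simp [hal, pvStepB]
      · have hne : c.toNat ≠ a.toNat := fun h => hac (pvCharToNat_inj h).symm
        have : (pvStepB d a).get? c.toNat = d.get? c.toNat := by
          unfold pvStepB
          split
          · exact PySem.Dict.get?_insert_of_ne _ _ hne
          · rfl
        have hca : ¬ c = a := fun h => hac h.symm
        simp [this, hca]

lemma pvJoin_nil (parts : List (List Char)) : PySem.Chars.join [] parts = parts.flatten := by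
  show (List.intersperse [] parts).flatten = parts.flatten
  induction parts with
  | nil => rfl
  | cons p ps ih => cases ps <;> simp_all [List.intersperse]

-- ===== VERDICT (by name: the statement is the Claim_ definition above) =====
theorem FormatFilenameAsGlob_py_spec : Claim_equal_FormatFilenameAsGlob_py := by
  intro filename _
  show FormatFilenameAsGlob_py filename = FormatFilenameAsGlob_py_alt filename
  unfold FormatFilenameAsGlob_py FormatFilenameAsGlob_py_alt
  simp only
  rw [pvA_fold, pvJoin_nil, List.nil_append]
  rw [show (fun (table : PySem.Dict Nat (List Char)) c =>
        if PySem.Chars.isalpha c = true then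
          table.insert c.toNat ['[', PySem.Chars.upperChar c, PySem.Chars.lowerChar c, ']']
        else table) = pvStepB from rfl]
  rw [List.flatMap_def]
  congr 1
  congr 1
  apply List.map_congr_left
  intro c hc
  rw [pvTable_get]
  have hm : c ∈ PySem.Set.ofList filename.toList := (PySem.Set.mem_ofList _ _).mpr hc
  by_cases h : PySem.Chars.isalpha c = true <;> simp [pvFrag, h, hm]
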